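-- pv_equiv track=rewrite | github.com/ebrancati/AdventOfCode | 2024/day10/part1.py | find_trailheads_and_scores
-- ===== SOURCE A (Python) =====
-- def find_trailheads_and_scores(topographic_map):
--     rows, cols = len(topographic_map), len(topographic_map[0])
--     directions = [(0, 1), (1, 0), (0, -1), (-1, 0)]
--
--     def dfs(x, y, current_height):
--         if topographic_map[x][y] == 9:
--             return {(x, y)}
--         reachable_nines = set()
--         for dx, dy in directions:
--             nx, ny = x + dx, y + dy
--             if 0 <= nx < rows and 0 <= ny < cols and topographic_map[nx][ny] == current_height + 1:
--                 reachable_nines |= dfs(nx, ny, current_height + 1)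
--         return reachable_nines
--
--     scores = []
--     for i in range(rows):
--         for j in range(cols):
--             if topographic_map[i][j] == 0:
--                 reachable = dfs(i, j, 0)
--                 scores.append(len(reachable))
--     return sum(scores)
-- ===== SOURCE B (Python) =====
-- def find_trailheads_and_scores(topographic_map):
--     rows, cols = len(topographic_map), len(topographic_map[0])
--     reach = {}
--     for x in range(rows):
--         for y in range(cols):
--             if topographic_map[x][y] == 9:
--                 reach[(x, y)] = {(x, y)}
--     for h in range(8, -1, -1):
--         for x in range(rows):
--             for y in range(cols):
--                 if topographic_map[x][y] == h:
--                     s = set()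
--                     for nx, ny in ((x, y + 1), (x + 1, y), (x, y - 1), (x - 1, y)):
--                         if 0 <= nx < rows and 0 <= ny < cols and topographic_map[nx][ny] == h + 1:
--                             s |= reach.get((nx, ny), set())
--                     reach[(x, y)] = s
--     return sum(len(reach.get((x, y), set()))
--                for x in range(rows) for y in range(cols)
--                if topographic_map[x][y] == 0)
-- ===== Notes on version B (the rewrite author's own statement) =====
-- stated objective: alternative
-- what changed: A computes each trailhead's reachable-9 set by a recursive DFS that re-explores every strictly increasing path; B instead runs one bottom-up dynamic-programming sweep over the whole grid, tabulating the reachable-9 set of every cell exactly once per height from 9 down to 0, and then sums the set sizes at the 0-cells.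
import Mathlib
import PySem

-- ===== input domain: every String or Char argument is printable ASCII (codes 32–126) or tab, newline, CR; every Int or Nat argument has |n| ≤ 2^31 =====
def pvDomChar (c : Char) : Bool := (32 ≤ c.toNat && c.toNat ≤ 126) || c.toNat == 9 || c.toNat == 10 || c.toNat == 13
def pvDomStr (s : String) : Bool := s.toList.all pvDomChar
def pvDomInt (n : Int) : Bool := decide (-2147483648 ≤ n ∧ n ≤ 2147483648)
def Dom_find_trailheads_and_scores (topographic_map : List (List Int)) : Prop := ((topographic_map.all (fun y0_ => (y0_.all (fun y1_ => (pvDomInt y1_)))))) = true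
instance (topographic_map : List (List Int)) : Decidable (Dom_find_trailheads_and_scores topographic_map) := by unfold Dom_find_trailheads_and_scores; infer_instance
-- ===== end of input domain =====

-- B replaces A's per-trailhead recursive DFS by one bottom-up dynamic-programming sweep
-- that computes the reachable-9 set of every cell once, by height 9 down to 0
-- (objective: alternative algorithm of similar cost on typical inputs).

-- ===== PORT A =====
-- topographic_map[x][y]: both programs only read it under the guards 0 ≤ x < rows,
-- 0 ≤ y < cols (or at scan indices), where Pre_ guarantees the index is in range,
-- so the defaulted read pyGetD is exact there.
def pvCell (tm : List (List Int)) (x y : Int) : Int :=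
  PySem.List.pyGetD (PySem.List.pyGetD tm x []) y 0

def pvDirs : List (Int × Int) := [(0, 1), (1, 0), (0, -1), (-1, 0)]

-- A's dfs. The fuel argument only serves Lean's termination checker: dfs is entered with
-- current_height 0 at a 0-cell and recurses only into cells of value current_height+1,
-- stopping at value 9, so its depth never exceeds 10 and fuel 10 is never exhausted.
def pvDfs (tm : List (List Int)) (rows cols : Int) :
    Nat → Int → Int → Int → PySem.Set (Int × Int)
  | 0, _, _, _ => PySem.Set.empty
  | (f + 1), x, y, h =>
    if pvCell tm x y = 9 then PySem.Set.ofList [(x, y)]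
    else pvDirs.foldl (fun s d =>
      if 0 ≤ x + d.1 ∧ x + d.1 < rows ∧ 0 ≤ y + d.2 ∧ y + d.2 < cols ∧
          pvCell tm (x + d.1) (y + d.2) = h + 1 then
        PySem.Set.union s (pvDfs tm rows cols f (x + d.1) (y + d.2) (h + 1))
      else s) PySem.Set.empty

def find_trailheads_and_scores (topographic_map : List (List Int)) : Int :=
  let rows : Int := topographic_map.length
  let cols : Int := (PySem.List.pyGetD topographic_map 0 []).length  -- len(tm[0]); tm = [] raises, excluded by Pre_
  let scores : List Int :=
    (PySem.List.pyRange 0 rows 1).foldl (fun acc i =>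
      (PySem.List.pyRange 0 cols 1).foldl (fun acc j =>
        if pvCell topographic_map i j = 0 then
          acc ++ [PySem.Set.len (pvDfs topographic_map rows cols 10 i j 0)]
        else acc) acc) []
  scores.sum

-- ===== PORT B =====
def pvNbrs (x y : Int) : List (Int × Int) := [(x, y + 1), (x + 1, y), (x, y - 1), (x - 1, y)]

-- union of reach.get((nx,ny), set()) over the admissible neighbours of (x,y)
def pvNbrUnion (tm : List (List Int)) (rows cols h : Int)
    (d : PySem.Dict (Int × Int) (PySem.Set (Int × Int))) (x y : Int) : PySem.Set (Int × Int) :=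
  (pvNbrs x y).foldl (fun s p =>
    if 0 ≤ p.1 ∧ p.1 < rows ∧ 0 ≤ p.2 ∧ p.2 < cols ∧ pvCell tm p.1 p.2 = h + 1 then
      PySem.Set.union s (d.getD p PySem.Set.empty)
    else s) PySem.Set.empty

-- the base loop: reach[(x,y)] = {(x,y)} for every 9-cell
def pvBase (tm : List (List Int)) (rows cols : Int) :
    PySem.Dict (Int × Int) (PySem.Set (Int × Int)) :=
  (PySem.List.pyRange 0 rows 1).foldl (fun d x =>
    (PySem.List.pyRange 0 cols 1).foldl (fun d y =>
      if pvCell tm x y = 9 then d.insert (x, y) (PySem.Set.ofList [(x, y)]) else d) d)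
    PySem.Dict.empty

-- one pass of the DP loop at height h
def pvPass (tm : List (List Int)) (rows cols h : Int)
    (d : PySem.Dict (Int × Int) (PySem.Set (Int × Int))) :
    PySem.Dict (Int × Int) (PySem.Set (Int × Int)) :=
  (PySem.List.pyRange 0 rows 1).foldl (fun d x =>
    (PySem.List.pyRange 0 cols 1).foldl (fun d y =>
      if pvCell tm x y = h then d.insert (x, y) (pvNbrUnion tm rows cols h d x y) else d) d) d

def find_trailheads_and_scores_alt (topographic_map : List (List Int)) : Int :=
  let rows : Int := topographic_map.length
  let cols : Int := (PySem.List.pyGetD topographic_map 0 []).length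
  let reach := (PySem.List.pyRange 8 (-1) (-1)).foldl
    (fun d h => pvPass topographic_map rows cols h d) (pvBase topographic_map rows cols)
  (PySem.List.pyRange 0 rows 1).foldl (fun acc x =>
    (PySem.List.pyRange 0 cols 1).foldl (fun acc y =>
      if pvCell topographic_map x y = 0 then
        acc + PySem.Set.len (reach.getD (x, y) PySem.Set.empty)
      else acc) acc) 0

-- ===== PRECONDITION & SPEC =====
-- Pre_ excludes exactly the inputs on which the Python A raises IndexError: the empty map
-- (len(topographic_map[0])) and maps with a row shorter than row 0 (the i,j scan reads
-- topographic_map[i][j] for every j < len(row 0)).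
def Pre_find_trailheads_and_scores (topographic_map : List (List Int)) : Prop :=
  topographic_map ≠ [] ∧
  ∀ row ∈ topographic_map, (PySem.List.pyGetD topographic_map 0 []).length ≤ row.length

instance (topographic_map : List (List Int)) : Decidable (Pre_find_trailheads_and_scores topographic_map) := by
  unfold Pre_find_trailheads_and_scores; infer_instance

def pvWitness_find_trailheads_and_scores : List (List Int) :=
  [[0, 1, 2, 3], [1, 2, 3, 4], [9, 8, 7, 5], [8, 9, 8, 9]]

def Spec_find_trailheads_and_scores (topographic_map : List (List Int)) (out : Int) : Prop := out = find_trailheads_and_scores_alt topographic_map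
instance (topographic_map : List (List Int)) (out : Int) : Decidable (Spec_find_trailheads_and_scores topographic_map out) := by unfold Spec_find_trailheads_and_scores; infer_instance

-- ===== CLAIM (what is proved, stated in full; the proofs are below) =====
def Claim_equal_find_trailheads_and_scores : Prop := ∀ (topographic_map : List (List Int)), Dom_find_trailheads_and_scores topographic_map → Pre_find_trailheads_and_scores topographic_map → Spec_find_trailheads_and_scores topographic_map (find_trailheads_and_scores topographic_map)

-- ===== LEMMAS AND PROOFS =====

-- Both pvBase and pvPass are instances of one generic grid sweep that, for every scanned
-- cell of value c, (re-)binds that cell to `val` of the current dictionary.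
def pvGrid (tm : List (List Int)) (rows cols c : Int)
    (val : PySem.Dict (Int × Int) (PySem.Set (Int × Int)) → Int → Int → PySem.Set (Int × Int))
    (d0 : PySem.Dict (Int × Int) (PySem.Set (Int × Int))) :
    PySem.Dict (Int × Int) (PySem.Set (Int × Int)) :=
  (PySem.List.pyRange 0 rows 1).foldl (fun d x =>
    (PySem.List.pyRange 0 cols 1).foldl (fun d y =>
      if pvCell tm x y = c then d.insert (x, y) (val d x y) else d) d) d0

-- "d agrees with d0 on every key whose cell value is not c"
def pvAg (tm : List (List Int)) (c : Int)
    (d0 d : PySem.Dict (Int × Int) (PySem.Set (Int × Int))) : Prop :=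
  ∀ p : Int × Int, pvCell tm p.1 p.2 ≠ c →
    d.getD p PySem.Set.empty = d0.getD p PySem.Set.empty

theorem pvAg_refl (tm : List (List Int)) (c : Int) (d0 : PySem.Dict (Int × Int) (PySem.Set (Int × Int))) :
    pvAg tm c d0 d0 := fun _ _ => rfl

theorem pvFoldl_pres {α β : Type} (P : α → Prop) (f : α → β → α) (L : List β)
    (H : ∀ a b, P a → P (f a b)) (a : α) (h : P a) : P (L.foldl f a) := by
  induction L generalizing a with
  | nil => exact h
  | cons b L ih => exact ih _ (H _ _ h)

-- one inner step of pvGrid preserves agreement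
theorem pvAg_step (tm : List (List Int)) (c : Int)
    (val : PySem.Dict (Int × Int) (PySem.Set (Int × Int)) → Int → Int → PySem.Set (Int × Int))
    (d0 : PySem.Dict (Int × Int) (PySem.Set (Int × Int)))
    (d : PySem.Dict (Int × Int) (PySem.Set (Int × Int))) (x y : Int)
    (h : pvAg tm c d0 d) :
    pvAg tm c d0 (if pvCell tm x y = c then d.insert (x, y) (val d x y) else d) := by
  split_ifs with hc
  · intro p hp
    rw [PySem.Dict.getD_insert_of_ne]
    · exact h p hp
    · rintro rfl; exact hp hc
  · exact h

-- one inner step of pvGrid preserves "agreement plus the (x,y) entry already equals val d0 x y"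
theorem pvGrid_step_presP (tm : List (List Int)) (c : Int)
    (val : PySem.Dict (Int × Int) (PySem.Set (Int × Int)) → Int → Int → PySem.Set (Int × Int))
    (d0 : PySem.Dict (Int × Int) (PySem.Set (Int × Int)))
    (hval : ∀ d x y, pvAg tm c d0 d → val d x y = val d0 x y)
    (x y : Int)
    (d : PySem.Dict (Int × Int) (PySem.Set (Int × Int))) (x' y' : Int)
    (hd : pvAg tm c d0 d ∧ d.getD (x, y) PySem.Set.empty = val d0 x y) :
    pvAg tm c d0 (if pvCell tm x' y' = c then d.insert (x', y') (val d x' y') else d) ∧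
      (if pvCell tm x' y' = c then d.insert (x', y') (val d x' y') else d).getD (x, y)
        PySem.Set.empty = val d0 x y := by
  obtain ⟨hag, hget⟩ := hd
  refine ⟨pvAg_step tm c val d0 d x' y' hag, ?_⟩
  split_ifs with hc'
  · by_cases hk : ((x' : Int), (y' : Int)) = (x, y)
    · rw [← hk, PySem.Dict.getD_insert_self, hval d x' y' hag]
      rw [Prod.mk.injEq] at hk
      rw [hk.1, hk.2]
    · rw [PySem.Dict.getD_insert_of_ne _ _ _ (fun h => hk h.symm)]
      exact hget
  · exact hget

theorem pvGrid_getD_eq (tm : List (List Int)) (rows cols c : Int)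
    (val : PySem.Dict (Int × Int) (PySem.Set (Int × Int)) → Int → Int → PySem.Set (Int × Int))
    (d0 : PySem.Dict (Int × Int) (PySem.Set (Int × Int)))
    (hval : ∀ d x y, pvAg tm c d0 d → val d x y = val d0 x y)
    (x y : Int) (hx : x ∈ PySem.List.pyRange 0 rows 1) (hy : y ∈ PySem.List.pyRange 0 cols 1)
    (hc : pvCell tm x y = c) :
    (pvGrid tm rows cols c val d0).getD (x, y) PySem.Set.empty = val d0 x y := by
  obtain ⟨l1, l2, hsplit⟩ := List.append_of_mem hx
  obtain ⟨m1, m2, hsplit2⟩ := List.append_of_mem hy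
  unfold pvGrid
  rw [hsplit, List.foldl_append, List.foldl_cons, hsplit2, List.foldl_append, List.foldl_cons]
  have hstep : ∀ (x' : Int) (d : PySem.Dict (Int × Int) (PySem.Set (Int × Int))) (y' : Int),
      (pvAg tm c d0 d ∧ d.getD (x, y) PySem.Set.empty = val d0 x y) →
      (pvAg tm c d0 (if pvCell tm x' y' = c then d.insert (x', y') (val d x' y') else d) ∧
        (if pvCell tm x' y' = c then d.insert (x', y') (val d x' y') else d).getD (x, y)
          PySem.Set.empty = val d0 x y) :=
    fun x' d y' hd => pvGrid_step_presP tm c val d0 hval x y d x' y' hd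
  have hag1 : pvAg tm c d0 (l1.foldl (fun d x' =>
      (m1 ++ y :: m2).foldl (fun d y' =>
        if pvCell tm x' y' = c then d.insert (x', y') (val d x' y') else d) d) d0) :=
    pvFoldl_pres (pvAg tm c d0) _ _
      (fun d x' hd => pvFoldl_pres (pvAg tm c d0) _ _
        (fun d y' hd => pvAg_step tm c val d0 d x' y' hd) d hd) d0 (pvAg_refl tm c d0)
  have hag2 : pvAg tm c d0 (m1.foldl (fun d y' =>
      if pvCell tm x y' = c then d.insert (x, y') (val d x y') else d)
      (l1.foldl (fun d x' =>
        (m1 ++ y :: m2).foldl (fun d y' =>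
          if pvCell tm x' y' = c then d.insert (x', y') (val d x' y') else d) d) d0)) :=
    pvFoldl_pres (pvAg tm c d0) _ _
      (fun d y' hd => pvAg_step tm c val d0 d x y' hd) _ hag1
  set d2 := m1.foldl (fun d y' =>
      if pvCell tm x y' = c then d.insert (x, y') (val d x y') else d)
      (l1.foldl (fun d x' =>
        (m1 ++ y :: m2).foldl (fun d y' =>
          if pvCell tm x' y' = c then d.insert (x', y') (val d x' y') else d) d) d0) with hd2
  have hP3 : pvAg tm c d0 (if pvCell tm x y = c then d2.insert (x, y) (val d2 x y) else d2) ∧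
      (if pvCell tm x y = c then d2.insert (x, y) (val d2 x y) else d2).getD (x, y)
        PySem.Set.empty = val d0 x y := by
    refine ⟨pvAg_step tm c val d0 d2 x y hag2, ?_⟩
    rw [if_pos hc, PySem.Dict.getD_insert_self, hval _ x y hag2]
  exact (pvFoldl_pres _ _ l2
    (fun d x' hd => pvFoldl_pres _ _ _ (fun d y' hd => hstep x' d y' hd) d hd) _
    (pvFoldl_pres _ _ m2 (fun d y' hd => hstep x d y' hd) _ hP3)).2

-- pvNbrUnion only reads keys of cell value h+1 ≠ h, so it is invariant under agreement
theorem pvNbrUnion_congr (tm : List (List Int)) (rows cols h : Int)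
    (d0 d : PySem.Dict (Int × Int) (PySem.Set (Int × Int)))
    (hd : pvAg tm h d0 d) (x y : Int) :
    pvNbrUnion tm rows cols h d x y = pvNbrUnion tm rows cols h d0 x y := by
  unfold pvNbrUnion
  refine PySem.List.foldl_congr_mem _ _ _ _ (fun s p _ => ?_)
  split_ifs with hg
  · rw [hd p (by rw [hg.2.2.2.2]; omega)]
  · rfl

-- the DP state after processing heights 8, 7, …, 8-(k-1)
def pvDown (tm : List (List Int)) (rows cols : Int) :
    Nat → PySem.Dict (Int × Int) (PySem.Set (Int × Int))
  | 0 => pvBase tm rows cols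
  | (k + 1) => pvPass tm rows cols (8 - (k : Int)) (pvDown tm rows cols k)

theorem pvReach_eq (tm : List (List Int)) (rows cols : Int) :
    (PySem.List.pyRange 8 (-1) (-1)).foldl (fun d h => pvPass tm rows cols h d)
      (pvBase tm rows cols) = pvDown tm rows cols 9 := by
  have h : PySem.List.pyRange 8 (-1) (-1) = [8, 7, 6, 5, 4, 3, 2, 1, 0] := by decide
  rw [h]
  simp only [List.foldl, pvDown]
  norm_num

-- base entries: a 9-cell in range is bound to {(x,y)}
theorem pvBase_getD_eq (tm : List (List Int)) (rows cols : Int) (x y : Int)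
    (hx : x ∈ PySem.List.pyRange 0 rows 1) (hy : y ∈ PySem.List.pyRange 0 cols 1)
    (hc : pvCell tm x y = 9) :
    (pvBase tm rows cols).getD (x, y) PySem.Set.empty = PySem.Set.ofList [(x, y)] := by
  exact pvGrid_getD_eq tm rows cols 9 (fun _ x y => PySem.Set.ofList [(x, y)])
    PySem.Dict.empty (fun _ _ _ _ => rfl) x y hx hy hc

-- pass entries: a h-cell in range is bound to the neighbour union over the incoming state
theorem pvPass_getD_eq (tm : List (List Int)) (rows cols h : Int)
    (d0 : PySem.Dict (Int × Int) (PySem.Set (Int × Int))) (x y : Int)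
    (hx : x ∈ PySem.List.pyRange 0 rows 1) (hy : y ∈ PySem.List.pyRange 0 cols 1)
    (hc : pvCell tm x y = h) :
    (pvPass tm rows cols h d0).getD (x, y) PySem.Set.empty = pvNbrUnion tm rows cols h d0 x y := by
  exact pvGrid_getD_eq tm rows cols h (fun d x y => pvNbrUnion tm rows cols h d x y) d0
    (fun d x y hd => pvNbrUnion_congr tm rows cols h d0 d hd x y) x y hx hy hc

-- the neighbour list is the direction list shifted by (x,y)
theorem pvNbrs_eq_map (x y : Int) :
    pvNbrs x y = pvDirs.map (fun d => (x + d.1, y + d.2)) := by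
  simp [pvNbrs, pvDirs, Prod.ext_iff]
  omega

-- MAIN INVARIANT: dfs with fuel f at a cell of value 10-f computes exactly the DP entry
-- of that cell after the passes down to height 10-f.
theorem pvMain (tm : List (List Int)) (rows cols : Int) :
    ∀ f : Nat, 1 ≤ f → f ≤ 10 → ∀ x y : Int,
      x ∈ PySem.List.pyRange 0 rows 1 → y ∈ PySem.List.pyRange 0 cols 1 →
      pvCell tm x y = 10 - (f : Int) →
      pvDfs tm rows cols f x y (10 - (f : Int)) =
        (pvDown tm rows cols (f - 1)).getD (x, y) PySem.Set.empty := by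
  intro f
  induction f with
  | zero => intro h1; exact absurd h1 (by norm_num)
  | succ f ih =>
    intro _ h10 x y hx hy hc
    by_cases hf0 : f = 0
    · subst hf0
      have h9 : (10 : Int) - ((1 : Nat) : Int) = 9 := by norm_num
      rw [h9] at hc ⊢
      show (if pvCell tm x y = 9 then PySem.Set.ofList [(x, y)] else _) =
        (pvDown tm rows cols 0).getD (x, y) PySem.Set.empty
      rw [if_pos hc]
      exact (pvBase_getD_eq tm rows cols x y hx hy hc).symm
    · obtain ⟨g, rfl⟩ : ∃ g, f = g + 1 := ⟨f - 1, by omega⟩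
      have hval10 : (10 : Int) - ((g + 1 + 1 : Nat) : Int) = 8 - (g : Int) := by push_cast; ring
      rw [hval10] at hc ⊢
      have hc9 : ¬ pvCell tm x y = 9 := by rw [hc]; omega
      show (if pvCell tm x y = 9 then PySem.Set.ofList [(x, y)] else
        pvDirs.foldl (fun s d =>
          if 0 ≤ x + d.1 ∧ x + d.1 < rows ∧ 0 ≤ y + d.2 ∧ y + d.2 < cols ∧
              pvCell tm (x + d.1) (y + d.2) = 8 - (g : Int) + 1 then
            PySem.Set.union s (pvDfs tm rows cols (g + 1) (x + d.1) (y + d.2) (8 - (g : Int) + 1))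
          else s) PySem.Set.empty) = _
      rw [if_neg hc9]
      have hrhs : pvDown tm rows cols (g + 1 + 1 - 1) =
          pvPass tm rows cols (8 - (g : Int)) (pvDown tm rows cols g) := rfl
      rw [hrhs, pvPass_getD_eq tm rows cols (8 - (g : Int)) (pvDown tm rows cols g) x y hx hy hc]
      unfold pvNbrUnion
      rw [pvNbrs_eq_map, List.foldl_map]
      refine PySem.List.foldl_congr_mem _ _ _ _ (fun s d _ => ?_)
      split_ifs with hg
      · congr 1
        have e1 : (8 : Int) - (g : Int) + 1 = 10 - ((g + 1 : Nat) : Int) := by push_cast; ring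
        have hcell : pvCell tm (x + d.1) (y + d.2) = 10 - ((g + 1 : Nat) : Int) := by
          rw [← e1]; exact hg.2.2.2.2
        have := ih (by omega) (by omega) (x + d.1) (y + d.2)
          (PySem.List.mem_pyRange_one.mpr ⟨hg.1, hg.2.1⟩)
          (PySem.List.mem_pyRange_one.mpr ⟨hg.2.2.1, hg.2.2.2.1⟩) hcell
        rw [e1, this]
        simp
      · rfl

-- shift lemma for the add-shaped inner loop
theorem pvRow_shift (tm : List (List Int)) (v : Int → Int → Int) (i : Int) (js : List Int)
    (s : Int) :
    js.foldl (fun s j => if pvCell tm i j = 0 then s + v i j else s) s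
      = s + js.foldl (fun s j => if pvCell tm i j = 0 then s + v i j else s) 0 := by
  induction js generalizing s with
  | nil => simp
  | cons j js ihj =>
    simp only [List.foldl_cons]
    split_ifs with hc
    · rw [ihj (s + v i j), ihj (0 + v i j)]; omega
    · exact ihj s

-- the append-shaped inner loop sums to the add-shaped inner loop
theorem pvRow_shape (tm : List (List Int)) (v : Int → Int → Int) (i : Int) (js : List Int)
    (acc : List Int) :
    (js.foldl (fun acc j => if pvCell tm i j = 0 then acc ++ [v i j] else acc) acc).sum
      = acc.sum + js.foldl (fun s j => if pvCell tm i j = 0 then s + v i j else s) 0 := by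
  induction js generalizing acc with
  | nil => simp
  | cons j js ihj =>
    simp only [List.foldl_cons]
    split_ifs with hc
    · rw [ihj (acc ++ [v i j]), pvRow_shift tm v i js (0 + v i j)]
      simp [List.sum_append]; omega
    · rw [ihj acc]

-- shift lemma for the add-shaped outer loop
theorem pvOuter_shift (tm : List (List Int)) (v : Int → Int → Int) (is js : List Int)
    (s : Int) :
    is.foldl (fun s i => js.foldl (fun s j => if pvCell tm i j = 0 then s + v i j else s) s) s
      = s + is.foldl (fun s i =>
          js.foldl (fun s j => if pvCell tm i j = 0 then s + v i j else s) s) 0 := by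
  induction is generalizing s with
  | nil => simp
  | cons i is ihi =>
    simp only [List.foldl_cons]
    rw [ihi (js.foldl _ s), ihi (js.foldl _ 0), pvRow_shift tm v i js s, pvRow_shift tm v i js 0]
    omega

-- the whole append-then-sum computation of A's shape equals B's add-shaped double loop
theorem pvSum_shape (tm : List (List Int)) (v : Int → Int → Int) (is js : List Int)
    (acc : List Int) :
    (is.foldl (fun acc i => js.foldl (fun acc j =>
        if pvCell tm i j = 0 then acc ++ [v i j] else acc) acc) acc).sum
      = acc.sum + is.foldl (fun acc i => js.foldl (fun acc j =>
          if pvCell tm i j = 0 then acc + v i j else acc) acc) 0 := by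
  induction is generalizing acc with
  | nil => simp
  | cons i is ihi =>
    simp only [List.foldl_cons]
    rw [ihi (js.foldl _ acc), pvRow_shape tm v i js acc,
      pvOuter_shift tm v is js (js.foldl _ 0)]
    omega

-- ===== VERDICT (by name: the statement is the Claim_ definition above) =====
theorem find_trailheads_and_scores_spec : Claim_equal_find_trailheads_and_scores := by
  intro tm _ _
  simp only [Spec_find_trailheads_and_scores, find_trailheads_and_scores,
    find_trailheads_and_scores_alt]
  rw [pvReach_eq]
  rw [pvSum_shape tm
    (fun i j => PySem.Set.len (pvDfs tm (tm.length : Int)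
      ((PySem.List.pyGetD tm 0 []).length : Int) 10 i j 0)) _ _ []]
  simp only [List.sum_nil, zero_add]
  refine PySem.List.foldl_congr_mem _ _ _ _ (fun acc i hi => ?_)
  refine PySem.List.foldl_congr_mem _ _ _ _ (fun acc j hj => ?_)
  split_ifs with hc
  · have h0 : (10 : Int) - ((10 : Nat) : Int) = 0 := by norm_num
    have hmain := pvMain tm (tm.length : Int) ((PySem.List.pyGetD tm 0 []).length : Int)
      10 (by norm_num) (by norm_num) i j hi hj (by rw [h0]; exact hc)
    rw [h0] at hmain
    rw [hmain]
  · rfl
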